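-- pv_equiv track=rewrite | github.com/bnjmacdonald/hansardparser | hansardparser/plenaryparser/build_training_set/mk_lines_corpus.py | _assign_label_codes
-- ===== SOURCE A (Python) =====
-- from typing import List, Tuple, Callable
--
-- def _assign_label_codes(labels: list) -> Tuple[List[int], dict]:
--     """converts str labels to int codes.
--
--     Returns:
--
--         all_labels_coded, label_codes: Tuple[List[int], dict]. First element of
--             tuple is list of label codes. Second element is dict containing
--             mapping of each unique label to its code.
--     """
--     label_codes = {}
--     labels_coded = []
--     for label in labels:
--         try:
--             code = label_codes[label]
--         except KeyError:
--             code = len(label_codes)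
--             label_codes[label] = code
--         labels_coded.append(code)
--     return labels_coded, label_codes
-- ===== SOURCE B (Python) =====
-- from typing import List, Tuple
--
-- def _assign_label_codes(labels: list) -> Tuple[List[int], dict]:
--     unique = list(dict.fromkeys(labels))
--     label_codes = {label: i for i, label in enumerate(unique)}
--     labels_coded = [label_codes[label] for label in labels]
--     return labels_coded, label_codes
-- ===== Notes on version B (the rewrite author's own statement) =====
-- stated objective: idiomatic
-- what changed: The single interleaved try/except loop that grows the dict while coding is replaced by three separate passes: dedupe with dict.fromkeys (first-appearance order), build the code map with enumerate, then map the labels through it with a comprehension.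
import Mathlib
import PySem

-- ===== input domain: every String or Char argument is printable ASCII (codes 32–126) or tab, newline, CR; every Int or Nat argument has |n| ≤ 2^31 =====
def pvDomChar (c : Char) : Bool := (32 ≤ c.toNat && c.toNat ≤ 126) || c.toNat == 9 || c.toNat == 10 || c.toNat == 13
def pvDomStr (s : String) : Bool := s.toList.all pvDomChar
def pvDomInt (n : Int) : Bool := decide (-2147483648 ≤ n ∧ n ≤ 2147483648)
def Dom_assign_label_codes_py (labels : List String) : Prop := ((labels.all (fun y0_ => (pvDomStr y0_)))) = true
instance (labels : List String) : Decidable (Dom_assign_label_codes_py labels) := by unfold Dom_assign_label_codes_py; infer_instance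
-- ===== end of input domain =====

-- B replaces A's interleaved try/except loop (grow the dict while coding) by three separate
-- passes: dedupe preserving first appearance, enumerate the unique labels, then map; same cost.

-- ===== PORT A =====
-- The Python dict is ported as an association list in insertion order; A only ever inserts
-- FRESH keys, so insertion = append and lookup = List.lookup (first match) — exact here.
-- `try: code = d[label] except KeyError:` is the `match` on the optional lookup.
def aLoop : List String → List (String × Int) → List Int → List Int × (List (String × Int))
  | [], d, acc => (acc, d)
  | l :: rest, d, acc =>
    match List.lookup l d with
    | some c => aLoop rest d (acc ++ [c])
    | none =>
      let c : Int := d.length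
      aLoop rest (d ++ [(l, c)]) (acc ++ [c])

def assign_label_codes_py (labels : List String) : List Int × (List (String × Int)) :=
  aLoop labels [] []

-- ===== PORT B =====
-- list(dict.fromkeys(labels)): keys in first-appearance order (re-inserting an existing key
-- keeps its position, so it is exactly this fold).
def bUnique (labels : List String) : List String :=
  labels.foldl (fun u l => if u.contains l then u else u ++ [l]) []

def assign_label_codes_py_alt (labels : List String) : List Int × (List (String × Int)) :=
  let unique := bUnique labels
  let label_codes := (PySem.List.enumerate unique).map (fun p => (p.2, p.1))
  let labels_coded := labels.map (fun l => (List.lookup l label_codes).getD 0)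
  (labels_coded, label_codes)

-- ===== PRECONDITION & SPEC =====
def Spec_assign_label_codes_py (labels : List String) (out : List Int × (List (String × Int))) : Prop := out = assign_label_codes_py_alt labels
instance (labels : List String) (out : List Int × (List (String × Int))) : Decidable (Spec_assign_label_codes_py labels out) := by unfold Spec_assign_label_codes_py; infer_instance

-- ===== CLAIM (what is proved, stated in full; the proofs are below) =====
def Claim_equal_assign_label_codes_py : Prop := ∀ (labels : List String), Dom_assign_label_codes_py labels → Spec_assign_label_codes_py labels (assign_label_codes_py labels)

-- ===== LEMMAS AND PROOFS =====

-- codesAux i u = the association list mapping u's elements to codes i, i+1, …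
def codesAux (i : Int) : List String → List (String × Int)
  | [] => []
  | x :: xs => (x, i) :: codesAux (i + 1) xs

theorem codesAux_length (u : List String) : ∀ i : Int, (codesAux i u).length = u.length := by
  induction u with
  | nil => intro i; rfl
  | cons x xs ih => intro i; simp [codesAux, ih]

theorem codesAux_append (u v : List String) : ∀ i : Int,
    codesAux i (u ++ v) = codesAux i u ++ codesAux (i + u.length) v := by
  induction u with
  | nil => intro i; simp [codesAux]
  | cons x xs ih =>
    intro i
    have harg : i + 1 + (xs.length : Int) = i + ((xs.length : Int) + 1) := by ring
    simp only [List.cons_append, codesAux, ih, List.length_cons, List.cons_append]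
    rw [harg]
    push_cast
    rfl

theorem lookup_codesAux_none {l : String} {u : List String} (h : l ∉ u) (i : Int) :
    List.lookup l (codesAux i u) = none := by
  induction u generalizing i with
  | nil => rfl
  | cons x xs ih =>
    simp only [List.mem_cons, not_or] at h
    have hbe : (l == x) = false := beq_eq_false_iff_ne.mpr h.1
    simp [codesAux, List.lookup, hbe, ih h.2]

theorem lookup_codesAux_isSome {l : String} {u : List String} (h : l ∈ u) (i : Int) :
    (List.lookup l (codesAux i u)).isSome := by
  induction u generalizing i with
  | nil => cases h
  | cons x xs ih =>
    by_cases hx : l = x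
    · simp [codesAux, hx]
    · have hm : l ∈ xs := by
        rcases List.mem_cons.mp h with h' | h'
        · exact absurd h' hx
        · exact h'
      have hbe : (l == x) = false := beq_eq_false_iff_ne.mpr hx
      simp [codesAux, List.lookup, hbe, ih hm]

theorem lookup_codesAux_prefix {l : String} {u : List String} (h : l ∈ u) (v : List String) (i : Int) :
    List.lookup l (codesAux i (u ++ v)) = List.lookup l (codesAux i u) := by
  induction u generalizing i with
  | nil => cases h
  | cons x xs ih =>
    by_cases hx : l = x
    · simp [codesAux, hx]
    · have hm : l ∈ xs := by
        rcases List.mem_cons.mp h with h' | h'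
        · exact absurd h' hx
        · exact h'
      have hbe : (l == x) = false := beq_eq_false_iff_ne.mpr hx
      simp [codesAux, List.lookup, hbe, ih hm]

theorem lookup_codesAux_new {l : String} {u : List String} (h : l ∉ u) (i : Int) :
    List.lookup l (codesAux i (u ++ [l])) = some (i + u.length) := by
  induction u generalizing i with
  | nil => simp [codesAux]
  | cons x xs ih =>
    simp only [List.mem_cons, not_or] at h
    have hbe : (l == x) = false := beq_eq_false_iff_ne.mpr h.1
    simp only [List.cons_append, codesAux, List.lookup, hbe, ih h.2, List.length_cons]
    push_cast
    congr 1
    ring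

-- the dedupe step of B
def ustep (u : List String) (l : String) : List String := if u.contains l then u else u ++ [l]

theorem ext_prefix (ls : List String) : ∀ u : List String, ∃ v, ls.foldl ustep u = u ++ v := by
  induction ls with
  | nil => intro u; exact ⟨[], by simp⟩
  | cons l ls ih =>
    intro u
    by_cases h : l ∈ u
    · obtain ⟨v, hv⟩ := ih u
      exact ⟨v, by simp only [List.foldl_cons, ustep, List.contains_eq_mem, h]; simpa using hv⟩
    · obtain ⟨v, hv⟩ := ih (u ++ [l])
      refine ⟨[l] ++ v, ?_⟩
      simp only [List.foldl_cons, ustep, List.contains_eq_mem, h, decide_false]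
      rw [if_neg (by simp), hv]
      simp
  
theorem aLoop_invariant (rest : List String) : ∀ (u : List String) (acc : List Int),
    aLoop rest (codesAux 0 u) acc =
      (acc ++ rest.map (fun l => (List.lookup l (codesAux 0 (rest.foldl ustep u))).getD 0),
       codesAux 0 (rest.foldl ustep u)) := by
  induction rest with
  | nil => intro u acc; simp [aLoop]
  | cons l rest ih =>
    intro u acc
    by_cases h : l ∈ u
    · obtain ⟨c, hlook⟩ := Option.isSome_iff_exists.mp (lookup_codesAux_isSome h 0)
      have hfold : (l :: rest).foldl ustep u = rest.foldl ustep u := by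
        simp [List.foldl_cons, ustep, h]
      rw [hfold]
      obtain ⟨v, hv⟩ := ext_prefix rest u
      have hstable : List.lookup l (codesAux 0 (rest.foldl ustep u)) =
          List.lookup l (codesAux 0 u) := by rw [hv]; exact lookup_codesAux_prefix h v 0
      simp only [aLoop, hlook, ih u (acc ++ [c]), List.map_cons, hstable]
      simp
    · have hlook : List.lookup l (codesAux 0 u) = none := lookup_codesAux_none h 0
      have hfold : (l :: rest).foldl ustep u = rest.foldl ustep (u ++ [l]) := by
        simp [List.foldl_cons, ustep, h]
      rw [hfold]
      have hgrow : codesAux 0 u ++ [(l, ((codesAux 0 u).length : Int))] = codesAux 0 (u ++ [l]) := by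
        rw [codesAux_append, codesAux_length]
        simp [codesAux]
      obtain ⟨v, hv⟩ := ext_prefix rest (u ++ [l])
      have hstable : List.lookup l (codesAux 0 (rest.foldl ustep (u ++ [l]))) =
          some ((u.length : Int)) := by
        rw [hv, lookup_codesAux_prefix (by simp) v 0, lookup_codesAux_new h 0]
        simp
      simp only [aLoop, hlook, hgrow, ih (u ++ [l]) _, List.map_cons, hstable]
      simp [codesAux_length]

theorem enumerate_map_eq_codesAux (u : List String) : ∀ i : Int,
    (PySem.List.enumerate u i).map (fun p => (p.2, p.1)) = codesAux i u := by
  induction u with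
  | nil => intro i; rfl
  | cons x xs ih => intro i; simp [PySem.List.enumerate_cons, codesAux, ih]

-- ===== VERDICT (by name: the statement is the Claim_ definition above) =====
theorem assign_label_codes_py_spec : Claim_equal_assign_label_codes_py := by
  intro labels _
  unfold Spec_assign_label_codes_py assign_label_codes_py assign_label_codes_py_alt bUnique
  have h := aLoop_invariant labels [] []
  simp only [codesAux] at h
  rw [show (fun (u : List String) (l : String) => if u.contains l then u else u ++ [l]) = ustep from rfl]
  rw [h]
  simp only [enumerate_map_eq_codesAux]
  simp
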